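-- pv_equiv track=rewrite | github.com/feedur/job | seek/sortdata.py | job_gen
-- ===== SOURCE A (Python) =====
-- def job_gen(positives, negatives):
--     jobs_in_negatives = []
--     for l in negatives:
--         jobs_in_negatives += l
--
--     for job_list in positives:
--         other_lists = []
--         for li in positives:
--             if li != job_list:
--                 other_lists.append(li)
--
--         for job in job_list:
--             to_yield = True
--             for li in other_lists:
--                 if job not in li:
--                     to_yield = False
--
--             if job in jobs_in_negatives:
--                 to_yield = False
--
--             if to_yield:
--                 yield job
-- ===== SOURCE B (Python) =====
-- def job_gen(positives, negatives):
--     if not positives: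
--         return
--     common = set(positives[0])
--     for l in positives[1:]:
--         common &= set(l)
--     neg = set()
--     for l in negatives:
--         neg |= set(l)
--     for job_list in positives:
--         for job in job_list:
--             if job in common and job not in neg:
--                 yield job
-- ===== Notes on version B (the rewrite author's own statement) =====
-- stated objective: faster
-- what changed: B precomputes the intersection set of all positive lists and the union set of all negative lists once, then does a single flat membership pass over the positives, instead of A's per-job rescan of every other positive list and of the concatenated negatives.
import Mathlib
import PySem

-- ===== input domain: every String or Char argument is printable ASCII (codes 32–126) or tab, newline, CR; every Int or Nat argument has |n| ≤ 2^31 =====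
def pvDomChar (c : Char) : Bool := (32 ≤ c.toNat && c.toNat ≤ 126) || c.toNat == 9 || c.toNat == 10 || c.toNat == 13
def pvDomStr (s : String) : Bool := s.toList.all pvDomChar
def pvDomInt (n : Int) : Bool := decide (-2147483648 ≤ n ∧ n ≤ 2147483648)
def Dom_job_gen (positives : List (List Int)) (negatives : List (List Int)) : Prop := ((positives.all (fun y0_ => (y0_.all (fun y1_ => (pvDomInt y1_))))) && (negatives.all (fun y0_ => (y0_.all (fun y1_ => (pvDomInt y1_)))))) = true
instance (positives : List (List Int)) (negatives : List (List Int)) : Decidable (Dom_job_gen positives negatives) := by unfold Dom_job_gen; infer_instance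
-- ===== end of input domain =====

-- B replaces A's per-job rescans of all other positive lists by one intersection set of all
-- positive lists plus one union set of the negatives, then a single flat membership pass
-- (objective: faster). A is a generator; equivalence is about the list of yielded values.

-- ===== PORT A =====
def job_gen (positives : List (List Int)) (negatives : List (List Int)) : List Int :=
  let jobs_in_negatives : List Int := negatives.foldl (fun acc l => acc ++ l) []
  positives.foldl (fun out job_list =>
    let other_lists : List (List Int) :=
      positives.foldl (fun acc li => if li ≠ job_list then acc ++ [li] else acc) []
    job_list.foldl (fun out2 job =>
      let t1 : Bool := other_lists.foldl (fun ty li => if !li.contains job then false else ty) true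
      let t2 : Bool := if jobs_in_negatives.contains job then false else t1
      if t2 then out2 ++ [job] else out2) out) []

-- ===== PORT B =====
def job_gen_alt (positives : List (List Int)) (negatives : List (List Int)) : List Int :=
  match positives with
  | [] => []
  | p0 :: rest =>
    let common : PySem.Set Int := rest.foldl (fun s l => PySem.Set.inter s l) (PySem.Set.ofList p0)
    let neg : PySem.Set Int := negatives.foldl (fun s l => PySem.Set.union s (PySem.Set.ofList l)) PySem.Set.empty
    (p0 :: rest).foldl (fun out job_list =>
      job_list.foldl (fun out2 job =>
        if common.contains job && !neg.contains job then out2 ++ [job] else out2) out) []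

-- ===== PRECONDITION & SPEC =====
def Spec_job_gen (positives : List (List Int)) (negatives : List (List Int)) (out : List Int) : Prop := out = job_gen_alt positives negatives
instance (positives : List (List Int)) (negatives : List (List Int)) (out : List Int) : Decidable (Spec_job_gen positives negatives out) := by unfold Spec_job_gen; infer_instance

-- ===== CLAIM (what is proved, stated in full; the proofs are below) =====
def Claim_equal_job_gen : Prop := ∀ (positives : List (List Int)) (negatives : List (List Int)), Dom_job_gen positives negatives → Spec_job_gen positives negatives (job_gen positives negatives)

-- ===== LEMMAS AND PROOFS =====

-- Nested yield loop = init ++ flatMap of per-list filters (predicate may depend on the list).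
theorem pvFoldl_nested_filter (p : List Int → Int → Bool) (ls : List (List Int)) (init : List Int) :
    ls.foldl (fun out jl => jl.foldl (fun o j => if p jl j then o ++ [j] else o) out) init
      = init ++ ls.flatMap (fun jl => (jl.filter (p jl))) := by
  induction ls generalizing init with
  | nil => simp
  | cons hd tl ih =>
      simp only [List.foldl_cons, List.flatMap_cons]
      rw [ih]
      have h := PySem.List.foldl_append_if (p hd) (fun j => j) hd init
      simp only [List.map_id'] at h
      rw [h, List.append_assoc]

theorem pvMem_foldl_inter (x : Int) (ls : List (List Int)) (s : PySem.Set Int) :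
    x ∈ ls.foldl (fun s l => PySem.Set.inter s l) s ↔ x ∈ s ∧ ∀ l ∈ ls, x ∈ l := by
  induction ls generalizing s with
  | nil => simp
  | cons hd tl ih =>
      simp only [List.foldl_cons, ih, PySem.Set.mem_inter, List.mem_cons]
      constructor
      · rintro ⟨⟨hs, hh⟩, ht⟩; exact ⟨hs, fun l hl => by rcases hl with rfl | hl; exact hh; exact ht l hl⟩
      · rintro ⟨hs, hall⟩; exact ⟨⟨hs, hall hd (Or.inl rfl)⟩, fun l hl => hall l (Or.inr hl)⟩

theorem pvMem_foldl_union (x : Int) (ls : List (List Int)) (s : PySem.Set Int) :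
    x ∈ ls.foldl (fun s l => PySem.Set.union s (PySem.Set.ofList l)) s ↔ x ∈ s ∨ ∃ l ∈ ls, x ∈ l := by
  induction ls generalizing s with
  | nil => simp
  | cons hd tl ih =>
      simp only [List.foldl_cons, ih, PySem.Set.mem_union, PySem.Set.mem_ofList, List.mem_cons]
      constructor
      · rintro (⟨hs | hh⟩ | ⟨l, hl, hx⟩)
        · exact Or.inl hs
        · exact Or.inr ⟨hd, Or.inl rfl, hh⟩
        · exact Or.inr ⟨l, Or.inr hl, hx⟩
      · rintro (hs | ⟨l, (rfl | hl), hx⟩)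
        · exact Or.inl (Or.inl hs)
        · exact Or.inl (Or.inr hx)
        · exact Or.inr ⟨l, hl, hx⟩

theorem pvFoldl_append_eq_flatten (ls : List (List Int)) :
    ls.foldl (fun acc l => acc ++ l) ([] : List Int) = ls.flatten := by
  have : ∀ init : List Int, ls.foldl (fun acc l => acc ++ l) init = init ++ ls.flatten := by
    induction ls with
    | nil => simp
    | cons hd tl ih => intro init; simp [ih, List.append_assoc]
  simpa using this []

-- ===== VERDICT (by name: the statement is the Claim_ definition above) =====
theorem job_gen_spec : Claim_equal_job_gen := by
  intro positives negatives _
  unfold Spec_job_gen job_gen job_gen_alt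
  cases positives with
  | nil => simp
  | cons p0 rest =>
      simp only []
      rw [pvFoldl_nested_filter (fun job_list job =>
            if (negatives.foldl (fun acc l => acc ++ l) []).contains job then false
            else (((p0 :: rest).foldl (fun acc li => if li ≠ job_list then acc ++ [li] else acc) []).foldl
                   (fun ty li => if !li.contains job then false else ty) true)),
          pvFoldl_nested_filter (fun _ job =>
            ((rest.foldl (fun s l => PySem.Set.inter s l) (PySem.Set.ofList p0)).contains job &&
             !((negatives.foldl (fun s l => PySem.Set.union s (PySem.Set.ofList l)) PySem.Set.empty).contains job)))]
      simp only [List.nil_append, List.flatMap_def]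
      refine congrArg List.flatten (List.map_congr_left ?_)
      intro jl hjl
      apply List.filter_congr
      intro job hjob
      rw [PySem.List.foldl_if_false_eq]
      have hother : List.foldl (fun acc li => if li ≠ jl then acc ++ [li] else acc) [] (p0 :: rest)
          = List.filter (fun li => decide (li ≠ jl)) (p0 :: rest) := by
        simpa using PySem.List.foldl_append_if (fun li => decide (li ≠ jl)) (fun li => (li : List Int)) (p0 :: rest) []
      rw [hother, pvFoldl_append_eq_flatten]
      have hc : ((rest.foldl (fun s l => PySem.Set.inter s l) (PySem.Set.ofList p0)).contains job = true)
          ↔ ∀ l ∈ p0 :: rest, job ∈ l := by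
        rw [PySem.Set.contains_iff, pvMem_foldl_inter, PySem.Set.mem_ofList]
        simp only [List.mem_cons]
        constructor
        · rintro ⟨h0, ht⟩ l (rfl | hl); exact h0; exact ht l hl
        · intro h; exact ⟨h p0 (Or.inl rfl), fun l hl => h l (Or.inr hl)⟩
      have hn : ((negatives.foldl (fun s l => PySem.Set.union s (PySem.Set.ofList l)) PySem.Set.empty).contains job = true)
          ↔ ∃ l ∈ negatives, job ∈ l := by
        rw [PySem.Set.contains_iff, pvMem_foldl_union]
        simp [PySem.Set.empty]
      by_cases h : ∃ l ∈ negatives, job ∈ l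
      · have h1 : (negatives.flatten.contains job) = true := by
          simp only [List.contains_eq_mem, List.mem_flatten]; exact decide_eq_true h
        have h2 := hn.mpr h
        simp only [h1, h2, if_true, Bool.not_true, Bool.and_false]
      · have h1 : (negatives.flatten.contains job) = false := by
          simp only [List.contains_eq_mem, List.mem_flatten]; exact decide_eq_false h
        have h2 : ((negatives.foldl (fun s l => PySem.Set.union s (PySem.Set.ofList l)) PySem.Set.empty).contains job) = false :=
          Bool.eq_false_iff.mpr (fun h' => h (hn.mp h'))
        simp only [h1, h2, Bool.not_false, Bool.and_true]
        by_cases hall : ∀ l ∈ p0 :: rest, job ∈ l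
        · have h3 := hc.mpr hall
          have h4 : (((p0 :: rest).filter (fun li => decide (li ≠ jl))).any fun li => !li.contains job) = false := by
            simp only [List.any_eq_false]
            intro li hli
            simp only [List.mem_filter, decide_eq_true_eq] at hli
            simp [List.contains_eq_mem, hall li hli.1]
          simp only [h3, h4]
          decide
        · have h3 : ((rest.foldl (fun s l => PySem.Set.inter s l) (PySem.Set.ofList p0)).contains job) = false :=
            Bool.eq_false_iff.mpr (fun h' => hall (hc.mp h'))
          push Not at hall
          obtain ⟨l, hl, hjl2⟩ := hall
          have hlne : l ≠ jl := by rintro rfl; exact hjl2 hjob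
          have h4 : (((p0 :: rest).filter (fun li => decide (li ≠ jl))).any fun li => !li.contains job) = true := by
            simp only [List.any_eq_true]
            exact ⟨l, List.mem_filter.mpr ⟨hl, decide_eq_true hlne⟩, by
              simp [List.contains_eq_mem, hjl2]⟩
          simp only [h3, h4]
          decide
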